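-- pv_equiv track=rewrite | github.com/29CM-Developers/test-automation | com_utils/values_control.py | find_next_value
-- ===== SOURCE A (Python) =====
-- def find_next_value(arr, keyword):
--     for i in range(len(arr)):
--         if keyword in arr[i]:
--             if i < len(arr) - 1:
--                 return arr[i + 1]
--             else:
--                 return None
--     return None
-- ===== SOURCE B (Python) =====
-- def find_next_value(arr, keyword):
--     # Right-fold: walk the list in REVERSE keeping (answer-for-this-suffix, element-just-seen).
--     # A match sets the answer to the element that follows it in original order; earlier
--     # matches (seen later in the reverse walk) override, so the FIRST match wins.
--     ans = None
--     nxt = None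
--     for x in reversed(arr):
--         if keyword in x:
--             ans = nxt
--         nxt = x
--     return ans
-- ===== Notes on version B (the rewrite author's own statement) =====
-- stated objective: alternative
-- what changed: B traverses the list in reverse with an accumulator (a right fold over suffixes): it keeps the answer for the current suffix and the previously seen element, so there is no index arithmetic, no i < len(arr)-1 boundary check and no early return; a match on the last element yields None because no element was seen before it in the reverse walk, and earlier matches override later ones so the first match wins.
import Mathlib
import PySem

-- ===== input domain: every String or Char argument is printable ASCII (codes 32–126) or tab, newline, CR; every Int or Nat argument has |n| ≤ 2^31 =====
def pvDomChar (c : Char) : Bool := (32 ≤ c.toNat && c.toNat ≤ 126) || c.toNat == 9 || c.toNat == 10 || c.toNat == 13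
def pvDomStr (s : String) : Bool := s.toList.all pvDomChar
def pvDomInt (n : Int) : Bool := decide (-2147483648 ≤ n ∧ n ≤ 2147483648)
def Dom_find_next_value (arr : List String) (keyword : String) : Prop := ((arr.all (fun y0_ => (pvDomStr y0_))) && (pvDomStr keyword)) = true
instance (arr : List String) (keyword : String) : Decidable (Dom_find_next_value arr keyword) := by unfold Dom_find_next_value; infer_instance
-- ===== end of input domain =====

-- B replaces A's forward index scan with early return by a reverse traversal keeping an
-- accumulator (a right fold over suffixes); alternative decomposition, same cost. No Pre_: A is total.

-- ===== PORT A =====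
-- the 'for i in range(len(arr))' loop with early return, as recursion on the index i
def find_next_value_go (arr : List String) (keyword : String) (i : Nat) : Option String :=
  if h : i < arr.length then
    if PySem.Str.isIn keyword arr[i] then
      if i < arr.length - 1 then arr[i + 1]? else none
    else
      find_next_value_go arr keyword (i + 1)
  else
    none
termination_by arr.length - i

def find_next_value (arr : List String) (keyword : String) : Option String :=
  find_next_value_go arr keyword 0

-- ===== PORT B =====
-- the 'for x in reversed(arr)' loop with state (ans, nxt), as a foldl over arr.reverse
def find_next_value_alt (arr : List String) (keyword : String) : Option String :=
  (arr.reverse.foldl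
    (fun (st : Option String × Option String) x =>
      ((if PySem.Str.isIn keyword x then st.2 else st.1), some x))
    (none, none)).1

-- ===== PRECONDITION & SPEC =====
def Spec_find_next_value (arr : List String) (keyword : String) (out : Option String) : Prop := out = find_next_value_alt arr keyword
instance (arr : List String) (keyword : String) (out : Option String) : Decidable (Spec_find_next_value arr keyword out) := by unfold Spec_find_next_value; infer_instance

-- ===== CLAIM =====
def Claim_equal_find_next_value : Prop := ∀ (arr : List String) (keyword : String), Dom_find_next_value arr keyword → Spec_find_next_value arr keyword (find_next_value arr keyword)

-- ===== LEMMAS AND PROOFS =====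

-- reference recursion both ports are reduced to
def fnv_ref (keyword : String) : List String → Option String
  | [] => none
  | x :: rest => if PySem.Str.isIn keyword x then rest.head? else fnv_ref keyword rest

-- A's indexed scan from i equals the reference recursion on the suffix arr.drop i
theorem find_next_value_go_eq_ref (arr : List String) (keyword : String) :
    ∀ (n i : Nat), arr.length - i ≤ n →
      find_next_value_go arr keyword i = fnv_ref keyword (arr.drop i) := by
  intro n
  induction n with
  | zero =>
      intro i hle
      have hlen : arr.length ≤ i := by omega
      rw [find_next_value_go]
      simp [List.drop_eq_nil_of_le hlen, fnv_ref, Nat.not_lt.mpr hlen]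
  | succ n ih =>
      intro i hle
      by_cases h : i < arr.length
      · rw [find_next_value_go, List.drop_eq_getElem_cons h]
        rw [dif_pos h]
        simp only [fnv_ref]
        split_ifs with hkw hi
        · -- match, not last: both are arr[i+1]?
          have : (arr.drop (i + 1)).head? = arr[i + 1]? := by
            simp [List.head?_eq_getElem?, List.getElem?_drop]
          exact this.symm
        · -- match, last element: arr[i+1]? = none = head? of empty suffix
          have hlen : arr.length ≤ i + 1 := by omega
          simp [List.drop_eq_nil_of_le hlen]
        · exact ih (i + 1) (by omega)
      · rw [find_next_value_go]
        have hlen : arr.length ≤ i := by omega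
        simp [h, List.drop_eq_nil_of_le hlen, fnv_ref]

-- B's reverse fold equals (reference recursion, head?) — the loop invariant of the reverse walk
theorem alt_fold_eq_ref (keyword : String) (l : List String) :
    l.reverse.foldl
      (fun (st : Option String × Option String) x =>
        ((if PySem.Str.isIn keyword x then st.2 else st.1), some x))
      (none, none) = (fnv_ref keyword l, l.head?) := by
  induction l with
  | nil => rfl
  | cons x rest ih =>
      rw [List.reverse_cons, List.foldl_append, ih]
      simp [fnv_ref]

-- ===== VERDICT =====
theorem find_next_value_spec : Claim_equal_find_next_value := by
  intro arr keyword _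
  unfold Spec_find_next_value find_next_value find_next_value_alt
  rw [alt_fold_eq_ref]
  simpa using find_next_value_go_eq_ref arr keyword arr.length 0 (by omega)
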